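-- pv_equiv track=rewrite | github.com/PylarBear/pybear | benchmarking/feature_extraction/text/TextStatistics/time_benchmarks/merge_character_frequency.py | type_1
-- ===== SOURCE A (Python) =====
-- def type_1(_string_frequency):
--
--     _character_frequency = {}
--
--     for _string, _ct in _string_frequency.items():
--         for _char in str(_string):
--             _character_frequency[_char] = \
--                 (_character_frequency.get(_char, 0) + _ct)
--
--     _character_frequency = dict((zip(
--         map(str, _character_frequency.keys()),
--         map(int, _character_frequency.values())
--     )))
--
--
--     return _character_frequency
-- ===== SOURCE B (Python) =====
-- def type_1(_string_frequency):
--     items = list(_string_frequency.items())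
--
--     # first pass: first-occurrence order of the characters across all keys
--     order = []
--     for _string, _ in items:
--         for _char in str(_string):
--             if _char not in order:
--                 order.append(_char)
--
--     # second pass: one weighted count per distinct character
--     return {
--         _char: sum(str(_string).count(_char) * _ct for _string, _ct in items)
--         for _char in order
--     }
-- ===== Notes on version B (the rewrite author's own statement) =====
-- stated objective: alternative
-- what changed: Replaces A's single dict-accumulating loop (one repeated addition per character occurrence, plus a redundant final str/int re-zip of the dict) by a two-phase decomposition: a first pass collecting the distinct characters in first-occurrence order, then one weighted count*ct sum per distinct character.
import Mathlib
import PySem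

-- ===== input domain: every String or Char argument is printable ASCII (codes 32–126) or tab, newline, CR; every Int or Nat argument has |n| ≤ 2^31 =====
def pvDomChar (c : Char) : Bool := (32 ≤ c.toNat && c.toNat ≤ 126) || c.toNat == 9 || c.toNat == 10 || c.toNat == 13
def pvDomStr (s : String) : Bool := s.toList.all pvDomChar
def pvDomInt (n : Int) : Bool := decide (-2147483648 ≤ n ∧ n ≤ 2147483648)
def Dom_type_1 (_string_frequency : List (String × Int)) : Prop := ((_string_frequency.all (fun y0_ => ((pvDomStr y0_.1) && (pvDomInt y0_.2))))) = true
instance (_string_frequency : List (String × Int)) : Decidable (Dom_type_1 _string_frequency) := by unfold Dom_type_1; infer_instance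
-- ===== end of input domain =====

-- B replaces A's single accumulating dict loop by a two-phase decomposition (first-occurrence
-- order pass, then one weighted count*ct sum per distinct character); same result, similar cost.

-- ===== PORT A =====
-- A receives a dict; `.items()` of the association-list argument is (PySem.Dict.ofList xs).items.
def type_1 (_string_frequency : List (String × Int)) : List (String × Int) :=
  let _character_frequency :=
    ((PySem.Dict.ofList _string_frequency).items).foldl
      (fun d p => p.1.toList.foldl
        (fun d c => d.insert (String.singleton c) (d.getD (String.singleton c) 0 + p.2)) d)
      PySem.Dict.empty
  -- dict(zip(map(str, keys), map(int, values))): str on a str and int on an int are identities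
  (PySem.Dict.ofList
    ((_character_frequency.keys.map (fun s => s)).zip
     (_character_frequency.values.map (fun n => n)))).items

-- ===== PORT B =====
-- `str(_string).count(_char)` for a single char is exactly List.count on the char list.
def type_1_alt (_string_frequency : List (String × Int)) : List (String × Int) :=
  let items := (PySem.Dict.ofList _string_frequency).items
  let order : List Char :=
    items.foldl (fun acc p => p.1.toList.foldl (fun acc c => PySem.Set.add acc c) acc) []
  (PySem.Dict.ofList
    (order.map (fun c =>
      (String.singleton c,
       (items.map (fun p => ((p.1.toList.count c : Int)) * p.2)).sum)))).items

-- ===== PRECONDITION & SPEC =====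
def Spec_type_1 (_string_frequency : List (String × Int)) (out : List (String × Int)) : Prop := out = type_1_alt _string_frequency
instance (_string_frequency : List (String × Int)) (out : List (String × Int)) : Decidable (Spec_type_1 _string_frequency out) := by unfold Spec_type_1; infer_instance

-- ===== CLAIM (what is proved, stated in full; the proofs are below) =====
def Claim_equal_type_1 : Prop := ∀ (_string_frequency : List (String × Int)), Dom_type_1 _string_frequency → Spec_type_1 _string_frequency (type_1 _string_frequency)

-- ===== LEMMAS AND PROOFS =====

theorem pv_singleton_inj {a b : Char} (h : String.singleton a = String.singleton b) : a = b := by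
  have := congrArg String.toList h; simpa using this

-- A's inner per-character loop, characterised against the running first-occurrence list os
-- and the running value function w.
theorem pv_inner (cs : List Char) (ct : Int) :
    ∀ (os : List Char) (w : Char → Int) (d : PySem.Dict String Int),
    d.items = os.map (fun c => (String.singleton c, w c)) → os.Nodup →
    (cs.foldl (fun d c => d.insert (String.singleton c) (d.getD (String.singleton c) 0 + ct)) d).items
      = (cs.foldl (fun acc c => PySem.Set.add acc c) os).map
          (fun c => (String.singleton c, (if c ∈ os then w c else 0) + ct * (cs.count c : Int))) := by
  induction cs with
  | nil =>
    intro os w d h hnd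
    rw [List.foldl_nil, List.foldl_nil, h]
    apply List.map_congr_left
    intro b hb
    simp [hb]
  | cons c cs ih =>
    intro os w d h hnd
    have hkeys : d.keys = os.map String.singleton := by
      simp [PySem.Dict.keys, h]
    have hnodk : d.keys.Nodup := by
      rw [hkeys]
      exact hnd.map (fun a b hab => pv_singleton_inj hab)
    rw [List.foldl_cons, List.foldl_cons]
    by_cases hc : c ∈ os
    · have hcont : d.contains (String.singleton c) = true := by
        rw [PySem.Dict.contains_iff_mem_keys, hkeys]
        exact List.mem_map_of_mem hc
      have hget : d.getD (String.singleton c) 0 = w c :=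
        PySem.Dict.getD_of_mem_items d (by rw [h]; exact List.mem_map_of_mem hc) hnodk 0
      have hitems : (d.insert (String.singleton c) (d.getD (String.singleton c) 0 + ct)).items
          = os.map (fun b => (String.singleton b, if b = c then w c + ct else w b)) := by
        rw [PySem.Dict.items_insert_of_contains _ _ hcont, h, List.map_map]
        apply List.map_congr_left
        intro b hb
        by_cases hbc : b = c
        · simp [hbc, hget]
        · have hne : String.singleton b ≠ String.singleton c := fun hh => hbc (pv_singleton_inj hh)
          simp [Function.comp, hne, hbc]
      rw [ih os (fun b => if b = c then w c + ct else w b) _ hitems hnd,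
          PySem.Set.add_of_mem hc]
      apply List.map_congr_left
      intro b hb
      by_cases hbc : b = c
      · subst hbc
        simp only [Prod.mk.injEq, true_and, if_pos hc, List.count_cons_self]
        push_cast
        ring
      · simp [hbc, Ne.symm hbc]
    · have hcont : d.contains (String.singleton c) = false := by
        rw [← Bool.not_eq_true, PySem.Dict.contains_iff_mem_keys, hkeys]
        intro hmem
        rcases List.mem_map.mp hmem with ⟨b, hb, hbc⟩
        exact hc (pv_singleton_inj hbc ▸ hb)
      have hget : d.getD (String.singleton c) 0 = 0 :=
        PySem.Dict.getD_of_not_contains d 0 hcont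
      have hitems : (d.insert (String.singleton c) (d.getD (String.singleton c) 0 + ct)).items
          = (os ++ [c]).map (fun b => (String.singleton b, if b = c then ct else w b)) := by
        rw [PySem.Dict.items_insert_of_not_contains _ _ hcont, h, List.map_append]
        congr 1
        · apply List.map_congr_left
          intro b hb
          have hbc : b ≠ c := fun hh => hc (hh ▸ hb)
          simp [hbc]
        · simp [hget]
      have hnd' : (os ++ [c]).Nodup := by
        simp only [List.nodup_append, List.nodup_singleton, true_and, hnd]
        intro a ha x hx
        rw [List.mem_singleton] at hx
        subst hx
        exact fun hh => hc (hh ▸ ha)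
      rw [ih (os ++ [c]) (fun b => if b = c then ct else w b) _ hitems hnd',
          PySem.Set.add_of_not_mem hc]
      apply List.map_congr_left
      intro b hb
      by_cases hbc : b = c
      · subst hbc
        simp only [Prod.mk.injEq, true_and, List.count_cons_self, List.mem_append,
          List.mem_singleton, or_true, if_true, if_neg hc]
        push_cast
        ring
      · simp [List.mem_append, hbc, Ne.symm hbc]

-- A's outer loop over the (string, count) pairs against B's order-collecting loop.
theorem pv_outer (ps : List (String × Int)) :
    ∀ (os : List Char) (w : Char → Int) (d : PySem.Dict String Int),
    d.items = os.map (fun c => (String.singleton c, w c)) → os.Nodup →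
    (ps.foldl (fun d p => p.1.toList.foldl
        (fun d c => d.insert (String.singleton c) (d.getD (String.singleton c) 0 + p.2)) d) d).items
      = (ps.foldl (fun acc p => p.1.toList.foldl (fun acc c => PySem.Set.add acc c) acc) os).map
          (fun c => (String.singleton c,
            (if c ∈ os then w c else 0) + (ps.map (fun p => ((p.1.toList.count c : Int)) * p.2)).sum)) := by
  induction ps with
  | nil =>
    intro os w d h hnd
    rw [List.foldl_nil, List.foldl_nil, h]
    apply List.map_congr_left
    intro b hb
    simp [hb]
  | cons p ps ih =>
    intro os w d h hnd
    rw [List.foldl_cons, List.foldl_cons]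
    have h1 := pv_inner p.1.toList p.2 os w d h hnd
    have hnd1 : (p.1.toList.foldl (fun acc c => PySem.Set.add acc c) os).Nodup :=
      PySem.Set.nodup_update os p.1.toList hnd
    rw [ih _ _ _ h1 hnd1]
    apply List.map_congr_left
    intro b hb
    have hmem : b ∈ p.1.toList.foldl (fun acc c => PySem.Set.add acc c) os
        ↔ b ∈ os ∨ b ∈ p.1.toList := PySem.Set.mem_update os p.1.toList b
    by_cases hbo : b ∈ p.1.toList.foldl (fun acc c => PySem.Set.add acc c) os
    · simp only [if_pos hbo, List.map_cons, List.sum_cons, Prod.mk.injEq, true_and]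
      ring
    · have hbos : b ∉ os := fun hh => hbo (hmem.mpr (Or.inl hh))
      have hbcs : b ∉ p.1.toList := fun hh => hbo (hmem.mpr (Or.inr hh))
      have hcount : p.1.toList.count b = 0 := List.count_eq_zero.mpr hbcs
      simp [hbo, hbos, hcount]

-- ===== VERDICT (by name: the statement is the Claim_ definition above) =====
theorem type_1_spec : Claim_equal_type_1 := by
  intro xs _
  show type_1 xs = type_1_alt xs
  unfold type_1 type_1_alt
  have h0 := pv_outer ((PySem.Dict.ofList xs).items) [] (fun _ => 0) PySem.Dict.empty rfl
    List.nodup_nil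
  have h1 : ((PySem.Dict.ofList xs).items.foldl (fun d p => p.1.toList.foldl
        (fun d c => d.insert (String.singleton c) (d.getD (String.singleton c) 0 + p.2)) d)
        PySem.Dict.empty).items
      = ((PySem.Dict.ofList xs).items.foldl
          (fun acc p => p.1.toList.foldl (fun acc c => PySem.Set.add acc c) acc) []).map
          (fun c => (String.singleton c,
            ((PySem.Dict.ofList xs).items.map
              (fun p => ((p.1.toList.count c : Int)) * p.2)).sum)) := by
    rw [h0]
    apply List.map_congr_left
    intro b hb
    simp
  simp only [PySem.Dict.keys, PySem.Dict.values, h1, List.map_map]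
  rw [List.zip_map']
  rfl
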